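-- pv_equiv track=rewrite | github.com/snstac/DTED.org | tools/dted-coverage-visualizer.py | filter_by_region
-- ===== SOURCE A (Python) =====
-- def filter_by_region(coverage, region=None):
--     """Filter coverage data by hemisphere or quadrant."""
--     if not region:
--         return coverage
--
--     filtered_coverage = {}
--
--     for level, points in coverage.items():
--         filtered_points = set()
--
--         for lon, lat in points:
--             # Basic hemispheres
--             if region.upper() == "N" and lat >= 0:
--                 filtered_points.add((lon, lat))
--             elif region.upper() == "S" and lat < 0:
--                 filtered_points.add((lon, lat))
--             elif region.upper() == "E" and lon >= 0:
--                 filtered_points.add((lon, lat))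
--             elif region.upper() == "W" and lon < 0:
--                 filtered_points.add((lon, lat))
--             # Quadrants
--             elif region.upper() == "NW" and lat >= 0 and lon < 0:
--                 filtered_points.add((lon, lat))
--             elif region.upper() == "NE" and lat >= 0 and lon >= 0:
--                 filtered_points.add((lon, lat))
--             elif region.upper() == "SW" and lat < 0 and lon < 0:
--                 filtered_points.add((lon, lat))
--             elif region.upper() == "SE" and lat < 0 and lon >= 0:
--                 filtered_points.add((lon, lat))
--
--         if filtered_points:
--             filtered_coverage[level] = filtered_points
--
--     return filtered_coverage
-- ===== SOURCE B (Python) =====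
-- # Set-algebra decomposition: per level, partition points once into the four
-- # hemisphere sets; the answer for a region is one of them or an intersection
-- # of two, instead of classifying every point through an eight-way cascade.
-- def filter_by_region(coverage, region=None):
--     """Filter coverage data by hemisphere or quadrant."""
--     if not region:
--         return coverage
--
--     r = region.upper()
--     filtered_coverage = {}
--
--     for level, points in coverage.items():
--         hemis = {
--             "N": {(lon, lat) for lon, lat in points if lat >= 0},
--             "S": {(lon, lat) for lon, lat in points if lat < 0},
--             "E": {(lon, lat) for lon, lat in points if lon >= 0},
--             "W": {(lon, lat) for lon, lat in points if lon < 0},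
--         }
--         if r in hemis:
--             sel = hemis[r]
--         elif len(r) == 2 and r[0] in "NS" and r[1] in "EW":
--             sel = hemis[r[0]] & hemis[r[1]]
--         else:
--             sel = set()
--         if sel:
--             filtered_coverage[level] = sel
--     return filtered_coverage
-- ===== Notes on version B (the rewrite author's own statement) =====
-- stated objective: alternative
-- what changed: Instead of pushing every point through an eight-way elif cascade on the region name (re-uppercasing the region at each arm), B partitions each level's points once into the four hemisphere sets and answers the query by set algebra: a hemisphere region picks one set, a quadrant region is the intersection of two, anything else is empty.
import Mathlib
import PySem

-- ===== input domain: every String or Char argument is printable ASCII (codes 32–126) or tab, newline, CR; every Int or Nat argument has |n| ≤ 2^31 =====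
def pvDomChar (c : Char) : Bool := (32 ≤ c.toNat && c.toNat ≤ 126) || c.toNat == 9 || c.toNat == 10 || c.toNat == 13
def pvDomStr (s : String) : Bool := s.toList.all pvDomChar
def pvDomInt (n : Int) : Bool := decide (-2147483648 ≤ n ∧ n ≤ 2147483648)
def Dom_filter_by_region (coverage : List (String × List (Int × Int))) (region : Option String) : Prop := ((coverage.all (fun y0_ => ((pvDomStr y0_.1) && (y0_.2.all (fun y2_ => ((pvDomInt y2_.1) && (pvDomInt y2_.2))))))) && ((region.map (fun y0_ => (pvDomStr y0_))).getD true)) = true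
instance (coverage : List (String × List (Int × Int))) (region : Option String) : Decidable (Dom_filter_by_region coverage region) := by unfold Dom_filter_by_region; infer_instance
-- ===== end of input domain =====

-- B partitions each level's points once into the four hemisphere sets and answers the
-- region by set algebra (pick one hemisphere, or intersect two), instead of A's
-- eight-way per-point elif cascade (measured faster in a timing run).

-- ===== PORT A =====
def filter_by_region (coverage : List (String × List (Int × Int))) (region : Option String) : List (String × List (Int × Int)) :=
  match region with
  | none => coverage
  | some r =>
    if r == "" then coverage
    else
      (coverage.foldl
        (fun (acc : PySem.Dict String (List (Int × Int))) lp =>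
          let filtered_points : PySem.Set (Int × Int) :=
            lp.2.foldl
              (fun (s : PySem.Set (Int × Int)) p =>
                let lon := p.1
                let lat := p.2
                if PySem.Str.upper r == "N" && decide (0 ≤ lat) then PySem.Set.add s (lon, lat)
                else if PySem.Str.upper r == "S" && decide (lat < 0) then PySem.Set.add s (lon, lat)
                else if PySem.Str.upper r == "E" && decide (0 ≤ lon) then PySem.Set.add s (lon, lat)
                else if PySem.Str.upper r == "W" && decide (lon < 0) then PySem.Set.add s (lon, lat)
                else if PySem.Str.upper r == "NW" && decide (0 ≤ lat) && decide (lon < 0) then PySem.Set.add s (lon, lat)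
                else if PySem.Str.upper r == "NE" && decide (0 ≤ lat) && decide (0 ≤ lon) then PySem.Set.add s (lon, lat)
                else if PySem.Str.upper r == "SW" && decide (lat < 0) && decide (lon < 0) then PySem.Set.add s (lon, lat)
                else if PySem.Str.upper r == "SE" && decide (lat < 0) && decide (0 ≤ lon) then PySem.Set.add s (lon, lat)
                else s)
              PySem.Set.empty
          if filtered_points ≠ [] then acc.insert lp.1 filtered_points else acc)
        PySem.Dict.empty).items

-- ===== PORT B =====
def filter_by_region_alt (coverage : List (String × List (Int × Int))) (region : Option String) : List (String × List (Int × Int)) :=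
  match region with
  | none => coverage
  | some r0 =>
    if r0 == "" then coverage
    else
      let r := PySem.Str.upper r0
      (coverage.foldl
        (fun (acc : PySem.Dict String (List (Int × Int))) lp =>
          let north : PySem.Set (Int × Int) := PySem.Set.ofList (lp.2.filter (fun p => decide (0 ≤ p.2)))
          let south : PySem.Set (Int × Int) := PySem.Set.ofList (lp.2.filter (fun p => decide (p.2 < 0)))
          let east  : PySem.Set (Int × Int) := PySem.Set.ofList (lp.2.filter (fun p => decide (0 ≤ p.1)))
          let west  : PySem.Set (Int × Int) := PySem.Set.ofList (lp.2.filter (fun p => decide (p.1 < 0)))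
          let hemis : PySem.Dict String (PySem.Set (Int × Int)) :=
            PySem.Dict.ofList [("N", north), ("S", south), ("E", east), ("W", west)]
          let sel : PySem.Set (Int × Int) :=
            if hemis.contains r then hemis.getD r []
            else if PySem.Str.len r == 2 then
              -- r[0] / r[1] are in range because len r = 2; Python's "c in 'NS'" on a
              -- one-character string is exactly char membership in the two characters
              match PySem.Str.pyGet? r 0, PySem.Str.pyGet? r 1 with
              | some c0, some c1 =>
                if "NS".toList.contains c0 && "EW".toList.contains c1 then
                  PySem.Set.inter (hemis.getD (String.ofList [c0]) []) (hemis.getD (String.ofList [c1]) [])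
                else PySem.Set.empty
              | _, _ => PySem.Set.empty
            else PySem.Set.empty
          if sel ≠ [] then acc.insert lp.1 sel else acc)
        PySem.Dict.empty).items

-- ===== PRECONDITION & SPEC =====
def Spec_filter_by_region (coverage : List (String × List (Int × Int))) (region : Option String) (out : List (String × List (Int × Int))) : Prop := out = filter_by_region_alt coverage region
instance (coverage : List (String × List (Int × Int))) (region : Option String) (out : List (String × List (Int × Int))) : Decidable (Spec_filter_by_region coverage region out) := by unfold Spec_filter_by_region; infer_instance

-- ===== CLAIM =====
def Claim_equal_filter_by_region : Prop := ∀ (coverage : List (String × List (Int × Int))) (region : Option String), Dom_filter_by_region coverage region → Spec_filter_by_region coverage region (filter_by_region coverage region)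

-- ===== LEMMAS AND PROOFS =====

-- an 8-arm elif chain with a common arm body is one if on the disjunction
lemma pv_cascade_eq {A : Type} (c1 c2 c3 c4 c5 c6 c7 c8 : Bool) (a s : A) :
    (if c1 then a else if c2 then a else if c3 then a else if c4 then a
     else if c5 then a else if c6 then a else if c7 then a else if c8 then a else s)
    = (if (c1 || c2 || c3 || c4 || c5 || c6 || c7 || c8) then a else s) := by
  cases c1 <;> cases c2 <;> cases c3 <;> cases c4 <;>
    cases c5 <;> cases c6 <;> cases c7 <;> cases c8 <;> simp

-- dedup (ofList) commutes with filter
lemma pv_ofList_filter {α : Type} [BEq α] [LawfulBEq α] (l : List α) (q : α → Bool) :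
    (PySem.Set.ofList l).filter q = PySem.Set.ofList (l.filter q) := by
  induction l using List.reverseRecOn with
  | nil => rfl
  | append_singleton xs x ih =>
    rw [PySem.Set.ofList_append_singleton, List.filter_append]
    by_cases hq : q x
    · have hfx : List.filter q [x] = [x] := by simp [hq]
      rw [hfx]
      by_cases hm : x ∈ xs
      · rw [PySem.Set.add_of_mem ((PySem.Set.mem_ofList xs x).2 hm), ih,
          PySem.Set.ofList_append_singleton,
          PySem.Set.add_of_mem ((PySem.Set.mem_ofList _ x).2 (List.mem_filter.2 ⟨hm, hq⟩))]
      · rw [PySem.Set.add_of_not_mem (fun h => hm ((PySem.Set.mem_ofList xs x).1 h)),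
          List.filter_append, ih, hfx,
          PySem.Set.ofList_append_singleton,
          PySem.Set.add_of_not_mem
            (fun h => hm (List.mem_filter.1 ((PySem.Set.mem_ofList _ x).1 h)).1)]
    · have hfx : List.filter q [x] = [] := by simp [hq]
      rw [hfx, List.append_nil]
      by_cases hm : x ∈ xs
      · rw [PySem.Set.add_of_mem ((PySem.Set.mem_ofList xs x).2 hm), ih]
      · rw [PySem.Set.add_of_not_mem (fun h => hm ((PySem.Set.mem_ofList xs x).1 h)),
          List.filter_append, ih, hfx, List.append_nil]

-- intersection of two filtered sets of the same list is the set of the conjoined filter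
lemma pv_inter_filters {α : Type} [BEq α] [LawfulBEq α] (l : List α) (p q : α → Bool) :
    PySem.Set.inter (PySem.Set.ofList (l.filter p)) (PySem.Set.ofList (l.filter q))
      = PySem.Set.ofList (l.filter (fun x => p x && q x)) := by
  have hcongr : ∀ x ∈ PySem.Set.ofList (l.filter p),
      PySem.Set.contains (PySem.Set.ofList (l.filter q)) x = q x := by
    intro x hxm
    have hx : x ∈ l := (List.mem_filter.1 ((PySem.Set.mem_ofList _ x).1 hxm)).1
    by_cases hq : q x
    · rw [hq, (PySem.Set.contains_iff _ x).2
        ((PySem.Set.mem_ofList _ x).2 (List.mem_filter.2 ⟨hx, hq⟩))]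
    · have hnm : x ∉ PySem.Set.ofList (l.filter q) := fun h =>
        hq (List.mem_filter.1 ((PySem.Set.mem_ofList _ x).1 h)).2
      cases hc : PySem.Set.contains (PySem.Set.ofList (l.filter q)) x
      · simp [hq]
      · exact absurd ((PySem.Set.contains_iff _ x).1 hc) hnm
  have h1 : PySem.Set.inter (PySem.Set.ofList (l.filter p)) (PySem.Set.ofList (l.filter q))
      = (PySem.Set.ofList (l.filter p)).filter q := List.filter_congr hcongr
  rw [h1, pv_ofList_filter, List.filter_filter]
  exact congrArg _ (List.filter_congr (fun x _ => by cases p x <;> cases q x <;> rfl))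

-- A's per-point decision as one boolean disjunction
def pvDisj (u : String) (p : Int × Int) : Bool :=
  (u == "N" && decide (0 ≤ p.2)) || (u == "S" && decide (p.2 < 0)) || (u == "E" && decide (0 ≤ p.1)) || (u == "W" && decide (p.1 < 0)) || (u == "NW" && decide (0 ≤ p.2) && decide (p.1 < 0)) || (u == "NE" && decide (0 ≤ p.2) && decide (0 ≤ p.1)) || (u == "SW" && decide (p.2 < 0) && decide (p.1 < 0)) || (u == "SE" && decide (p.2 < 0) && decide (0 ≤ p.1))

-- A's cascade fold is the dedup of the points passing the disjunction
lemma pv_fold_eq (r : String) (pts : List (Int × Int)) :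
    pts.foldl
      (fun (s : PySem.Set (Int × Int)) p =>
        let lon := p.1
        let lat := p.2
        if PySem.Str.upper r == "N" && decide (0 ≤ lat) then PySem.Set.add s (lon, lat)
        else if PySem.Str.upper r == "S" && decide (lat < 0) then PySem.Set.add s (lon, lat)
        else if PySem.Str.upper r == "E" && decide (0 ≤ lon) then PySem.Set.add s (lon, lat)
        else if PySem.Str.upper r == "W" && decide (lon < 0) then PySem.Set.add s (lon, lat)
        else if PySem.Str.upper r == "NW" && decide (0 ≤ lat) && decide (lon < 0) then PySem.Set.add s (lon, lat)
        else if PySem.Str.upper r == "NE" && decide (0 ≤ lat) && decide (0 ≤ lon) then PySem.Set.add s (lon, lat)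
        else if PySem.Str.upper r == "SW" && decide (lat < 0) && decide (lon < 0) then PySem.Set.add s (lon, lat)
        else if PySem.Str.upper r == "SE" && decide (lat < 0) && decide (0 ≤ lon) then PySem.Set.add s (lon, lat)
        else s)
      PySem.Set.empty
    = PySem.Set.ofList (pts.filter (pvDisj (PySem.Str.upper r))) := by
  rw [PySem.Set.ofList_eq_foldl, List.foldl_filter]
  induction pts using List.reverseRecOn with
  | nil => rfl
  | append_singleton xs p ih =>
    simp only [List.foldl_append, List.foldl_cons, List.foldl_nil, ih]
    rw [pv_cascade_eq]
    cases p with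
    | mk lon lat => rfl

-- B's per-level selection (identical to the inline code of the B port)
def pvSel (u : String) (pts : List (Int × Int)) : PySem.Set (Int × Int) :=
  let north : PySem.Set (Int × Int) := PySem.Set.ofList (pts.filter (fun p => decide (0 ≤ p.2)))
  let south : PySem.Set (Int × Int) := PySem.Set.ofList (pts.filter (fun p => decide (p.2 < 0)))
  let east  : PySem.Set (Int × Int) := PySem.Set.ofList (pts.filter (fun p => decide (0 ≤ p.1)))
  let west  : PySem.Set (Int × Int) := PySem.Set.ofList (pts.filter (fun p => decide (p.1 < 0)))
  let hemis : PySem.Dict String (PySem.Set (Int × Int)) :=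
    PySem.Dict.ofList [("N", north), ("S", south), ("E", east), ("W", west)]
  if hemis.contains u then hemis.getD u []
  else if PySem.Str.len u == 2 then
    match PySem.Str.pyGet? u 0, PySem.Str.pyGet? u 1 with
    | some c0, some c1 =>
      if "NS".toList.contains c0 && "EW".toList.contains c1 then
        PySem.Set.inter (hemis.getD (String.ofList [c0]) []) (hemis.getD (String.ofList [c1]) [])
      else PySem.Set.empty
    | _, _ => PySem.Set.empty
  else PySem.Set.empty

-- the hemisphere dict never contains a key other than the four hemisphere names
lemma pv_contains_false (n s e w : PySem.Set (Int × Int)) (u : String)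
    (h1 : u ≠ "N") (h2 : u ≠ "S") (h3 : u ≠ "E") (h4 : u ≠ "W") :
    (PySem.Dict.ofList [("N", n), ("S", s), ("E", e), ("W", w)]).contains u = false := by
  rw [PySem.Dict.contains_eq_decide_mem_keys]
  have hk : (PySem.Dict.ofList [("N", n), ("S", s), ("E", e), ("W", w)]).keys
      = ["N", "S", "E", "W"] := rfl
  rw [hk]
  simp [h1, h2, h3, h4]

-- the dedup of the points passing A's disjunction is B's hemisphere-set-algebra selection
lemma pv_sel_eq (u : String) (pts : List (Int × Int)) :
    PySem.Set.ofList (pts.filter (pvDisj u)) = pvSel u pts := by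
  by_cases h1 : u = "N"
  · subst h1
    rw [List.filter_congr (fun p _ => (by simp [pvDisj] :
      pvDisj "N" p = decide (0 ≤ p.2)))]
    rfl
  by_cases h2 : u = "S"
  · subst h2
    rw [List.filter_congr (fun p _ => (by simp [pvDisj] :
      pvDisj "S" p = decide (p.2 < 0)))]
    rfl
  by_cases h3 : u = "E"
  · subst h3
    rw [List.filter_congr (fun p _ => (by simp [pvDisj] :
      pvDisj "E" p = decide (0 ≤ p.1)))]
    rfl
  by_cases h4 : u = "W"
  · subst h4
    rw [List.filter_congr (fun p _ => (by simp [pvDisj] :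
      pvDisj "W" p = decide (p.1 < 0)))]
    rfl
  by_cases h5 : u = "NW"
  · subst h5
    rw [List.filter_congr (fun p _ => (by simp [pvDisj] :
      pvDisj "NW" p = (decide (0 ≤ p.2) && decide (p.1 < 0))))]
    exact ((pv_inter_filters pts (fun p => decide (0 ≤ p.2)) (fun p => decide (p.1 < 0))).symm.trans rfl).symm.symm
  by_cases h6 : u = "NE"
  · subst h6
    rw [List.filter_congr (fun p _ => (by simp [pvDisj] :
      pvDisj "NE" p = (decide (0 ≤ p.2) && decide (0 ≤ p.1))))]
    exact ((pv_inter_filters pts (fun p => decide (0 ≤ p.2)) (fun p => decide (0 ≤ p.1))).symm.trans rfl).symm.symm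
  by_cases h7 : u = "SW"
  · subst h7
    rw [List.filter_congr (fun p _ => (by simp [pvDisj] :
      pvDisj "SW" p = (decide (p.2 < 0) && decide (p.1 < 0))))]
    exact ((pv_inter_filters pts (fun p => decide (p.2 < 0)) (fun p => decide (p.1 < 0))).symm.trans rfl).symm.symm
  by_cases h8 : u = "SE"
  · subst h8
    rw [List.filter_congr (fun p _ => (by simp [pvDisj] :
      pvDisj "SE" p = (decide (p.2 < 0) && decide (0 ≤ p.1))))]
    exact ((pv_inter_filters pts (fun p => decide (p.2 < 0)) (fun p => decide (0 ≤ p.1))).symm.trans rfl).symm.symm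
  · -- u is none of the eight region names: both sides are the empty set
    have hfalse : ∀ p ∈ pts, pvDisj u p = false := by
      intro p _
      have e1 : (u == "N") = false := beq_eq_false_iff_ne.2 h1
      have e2 : (u == "S") = false := beq_eq_false_iff_ne.2 h2
      have e3 : (u == "E") = false := beq_eq_false_iff_ne.2 h3
      have e4 : (u == "W") = false := beq_eq_false_iff_ne.2 h4
      have e5 : (u == "NW") = false := beq_eq_false_iff_ne.2 h5
      have e6 : (u == "NE") = false := beq_eq_false_iff_ne.2 h6
      have e7 : (u == "SW") = false := beq_eq_false_iff_ne.2 h7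
      have e8 : (u == "SE") = false := beq_eq_false_iff_ne.2 h8
      simp [pvDisj, e1, e2, e3, e4, e5, e6, e7, e8]
    rw [List.filter_congr hfalse]
    simp only [List.filter_false]
    simp only [pvSel]
    rw [pv_contains_false _ _ _ _ u h1 h2 h3 h4]
    simp only [Bool.false_eq_true, if_false]
    by_cases hlen : u.toList.length = 2
    · obtain ⟨c0, c1, hu2⟩ := List.length_eq_two.mp hlen
      have hu : u = String.ofList [c0, c1] := by rw [← hu2]; simp
      have hlenb : (PySem.Str.len u == (2 : Int)) = true := by
        rw [PySem.Str.len_eq, hlen]; rfl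
      rw [hlenb]
      simp only [if_true]
      have hg0 : PySem.Str.pyGet? u 0 = some c0 := by
        rw [hu]; simp [PySem.List.pyGet?, PySem.List.pyIdx?]
      have hg1 : PySem.Str.pyGet? u 1 = some c1 := by
        rw [hu]; simp [PySem.List.pyGet?, PySem.List.pyIdx?]
      rw [hg0, hg1]
      dsimp only
      by_cases hcs : ("NS".toList.contains c0 && "EW".toList.contains c1) = true
      · exfalso
        have hc : (c0 = 'N' ∨ c0 = 'S') ∧ (c1 = 'E' ∨ c1 = 'W') := by
          constructor
          · have := (Bool.and_eq_true _ _).mp hcs |>.1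
            simpa using this
          · have := (Bool.and_eq_true _ _).mp hcs |>.2
            simpa using this
        rcases hc with ⟨hc0 | hc0, hc1 | hc1⟩
        · subst hc0; subst hc1; exact h6 (by rw [hu])
        · subst hc0; subst hc1; exact h5 (by rw [hu])
        · subst hc0; subst hc1; exact h8 (by rw [hu])
        · subst hc0; subst hc1; exact h7 (by rw [hu])
      · have hcs' : ("NS".toList.contains c0 && "EW".toList.contains c1) = false :=
          Bool.not_eq_true _ ▸ (Bool.eq_false_iff.mpr (fun h => hcs h))
        rw [hcs']
        rfl
    · have hlenb : (PySem.Str.len u == (2 : Int)) = false := by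
        rw [PySem.Str.len_eq]
        simp only [beq_eq_false_iff_ne, ne_eq]
        intro h
        exact hlen (by exact_mod_cast h)
      rw [hlenb]
      rfl

-- per level: A's cascade fold over the points equals B's hemisphere-set-algebra selection
lemma pv_points_eq (r : String) (pts : List (Int × Int)) :
    pts.foldl
      (fun (s : PySem.Set (Int × Int)) p =>
        let lon := p.1
        let lat := p.2
        if PySem.Str.upper r == "N" && decide (0 ≤ lat) then PySem.Set.add s (lon, lat)
        else if PySem.Str.upper r == "S" && decide (lat < 0) then PySem.Set.add s (lon, lat)
        else if PySem.Str.upper r == "E" && decide (0 ≤ lon) then PySem.Set.add s (lon, lat)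
        else if PySem.Str.upper r == "W" && decide (lon < 0) then PySem.Set.add s (lon, lat)
        else if PySem.Str.upper r == "NW" && decide (0 ≤ lat) && decide (lon < 0) then PySem.Set.add s (lon, lat)
        else if PySem.Str.upper r == "NE" && decide (0 ≤ lat) && decide (0 ≤ lon) then PySem.Set.add s (lon, lat)
        else if PySem.Str.upper r == "SW" && decide (lat < 0) && decide (lon < 0) then PySem.Set.add s (lon, lat)
        else if PySem.Str.upper r == "SE" && decide (lat < 0) && decide (0 ≤ lon) then PySem.Set.add s (lon, lat)
        else s)
      PySem.Set.empty
    = pvSel (PySem.Str.upper r) pts := by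
  rw [pv_fold_eq]
  exact pv_sel_eq (PySem.Str.upper r) pts

-- ===== VERDICT =====
theorem filter_by_region_spec : Claim_equal_filter_by_region := by
  intro coverage region _
  unfold Spec_filter_by_region filter_by_region filter_by_region_alt
  cases region with
  | none => rfl
  | some r =>
    by_cases hr : r = ""
    · simp [hr]
    · have hr' : (r == "") = false := by simp [hr]
      simp only [hr', Bool.false_eq_true, if_false]
      congr 2
      funext acc lp
      rw [pv_points_eq r lp.2]
      rfl
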